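-- pv_equiv track=rewrite | github.com/Koga-Senbokubiz/project | tools/domains/order/過去分/20260413/order_x2dfax_base.py | cf_ymd_yy_mm_dd
-- ===== SOURCE A (Python) =====
-- def ascii_trim(text: str) -> str:
--     return str(text or "").replace("\r", " ").replace("\n", " ").strip()
--
-- def cf_ymd_yy_mm_dd(val: str) -> str:
--     s = ascii_trim(val)
--     if not s:
--         return ""
--     digits = "".join(ch for ch in s if ch.isdigit())
--     if len(digits) >= 8:
--         digits = digits[-8:] if len(digits) > 8 else digits
--         return digits[2:4] + "." + digits[4:6] + "." + digits[6:8]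
--     if len(digits) == 6:
--         return digits[0:2] + "." + digits[2:4] + "." + digits[4:6]
--     return s
-- ===== SOURCE B (Python) =====
-- def cf_ymd_yy_mm_dd(val: str) -> str:
--     s = str(val or "").replace("\r", " ").replace("\n", " ").strip()
--     if not s:
--         return ""
--     # Single reverse scan: count all digits, keep only the last six in a small buffer.
--     total = 0
--     buf = []  # the last digits of s, most recent first, at most 6 of them
--     for ch in reversed(s):
--         if ch.isdigit():
--             total += 1
--             if len(buf) < 6:
--                 buf.append(ch)
--     if total >= 8 or total == 6:
--         core = buf[::-1]
--         return "".join(core[0:2]) + "." + "".join(core[2:4]) + "." + "".join(core[4:6])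
--     return s
-- ===== Notes on version B (the rewrite author's own statement) =====
-- stated objective: alternative
-- what changed: Instead of building the full digit string and formatting it via two separate slice-and-concatenate branches, B does a single reverse scan that counts digits while keeping only the last six in a bounded buffer, then formats that common six-digit core in one unified branch.
import Mathlib
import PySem

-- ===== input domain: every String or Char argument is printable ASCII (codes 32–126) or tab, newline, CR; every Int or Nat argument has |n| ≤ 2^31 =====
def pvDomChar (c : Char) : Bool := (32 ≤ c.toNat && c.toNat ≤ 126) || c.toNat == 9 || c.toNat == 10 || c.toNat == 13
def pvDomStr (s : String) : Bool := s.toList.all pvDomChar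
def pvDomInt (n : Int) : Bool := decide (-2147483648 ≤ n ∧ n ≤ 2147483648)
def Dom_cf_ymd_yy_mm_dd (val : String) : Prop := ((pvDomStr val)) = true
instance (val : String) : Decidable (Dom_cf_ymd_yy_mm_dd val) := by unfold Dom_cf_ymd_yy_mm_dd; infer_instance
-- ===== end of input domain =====

-- B replaces A's build-the-full-digit-string-then-slice-in-two-branches scheme by a single
-- reverse scan with a bounded 6-digit buffer and one unified formatting branch (objective: alternative).

-- ===== PORT A =====
-- ascii_trim(text): str(text or "") is the identity on str inputs, so it is ported as text itself
def asciiTrim (text : String) : List Char :=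
  PySem.Chars.strip (PySem.Chars.replace (PySem.Chars.replace text.toList ['\r'] [' ']) ['\n'] [' '])

def cf_ymd_yy_mm_dd (val : String) : String :=
  let s := asciiTrim val
  if s = [] then ""
  else
    let digits := s.filter PySem.Chars.isdigit
    if 8 ≤ digits.length then
      let digits := if 8 < digits.length then PySem.List.slice digits (some (-8)) none else digits
      String.ofList (PySem.List.slice digits (some 2) (some 4) ++
        '.' :: (PySem.List.slice digits (some 4) (some 6) ++
        '.' :: PySem.List.slice digits (some 6) (some 8)))
    else if digits.length = 6 then
      String.ofList (PySem.List.slice digits (some 0) (some 2) ++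
        '.' :: (PySem.List.slice digits (some 2) (some 4) ++
        '.' :: PySem.List.slice digits (some 4) (some 6)))
    else String.ofList s

-- ===== PORT B =====
-- the loop body of Source B's reverse scan: count every digit, append the first six seen to buf
def pvStep (st : Nat × List Char) (ch : Char) : Nat × List Char :=
  if PySem.Chars.isdigit ch then
    (st.1 + 1, if st.2.length < 6 then st.2 ++ [ch] else st.2)
  else st

def cf_ymd_yy_mm_dd_alt (val : String) : String :=
  let s := PySem.Chars.strip (PySem.Chars.replace (PySem.Chars.replace val.toList ['\r'] [' ']) ['\n'] [' '])
  if s = [] then ""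
  else
    let st := s.reverse.foldl pvStep (0, [])
    if 8 ≤ st.1 ∨ st.1 = 6 then
      let core := st.2.reverse
      String.ofList (PySem.List.slice core (some 0) (some 2) ++
        '.' :: (PySem.List.slice core (some 2) (some 4) ++
        '.' :: PySem.List.slice core (some 4) (some 6)))
    else String.ofList s

-- ===== PRECONDITION & SPEC =====
def Spec_cf_ymd_yy_mm_dd (val : String) (out : String) : Prop := out = cf_ymd_yy_mm_dd_alt val
instance (val : String) (out : String) : Decidable (Spec_cf_ymd_yy_mm_dd val out) := by unfold Spec_cf_ymd_yy_mm_dd; infer_instance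

-- ===== CLAIM (what is proved, stated in full; the proofs are below) =====
def Claim_equal_cf_ymd_yy_mm_dd : Prop := ∀ (val : String), Dom_cf_ymd_yy_mm_dd val → Spec_cf_ymd_yy_mm_dd val (cf_ymd_yy_mm_dd val)

-- ===== LEMMAS AND PROOFS =====

-- one step of Source B's buffer: appending to a 6-capped buffer is take 6 of the snoc
theorem pvTake6_snoc (xs : List Char) (a : Char) :
    (if (xs.take 6).length < 6 then xs.take 6 ++ [a] else xs.take 6) = (xs ++ [a]).take 6 := by
  by_cases h : xs.length < 6
  · rw [List.take_of_length_le (le_of_lt h), if_pos (by simpa using h),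
      List.take_of_length_le (by simp; omega)]
  · rw [if_neg (by simp; omega), List.take_append_of_le_length (by omega)]

-- Source B's reverse scan computes the digit count and the last six digits (in reverse)
theorem pvLoop_spec (l : List Char) :
    l.reverse.foldl pvStep (0, []) =
      (l.countP PySem.Chars.isdigit, ((l.filter PySem.Chars.isdigit).reverse).take 6) := by
  induction l with
  | nil => simp
  | cons a l ih =>
    rw [List.reverse_cons, List.foldl_append, ih]
    simp only [List.foldl_cons, List.foldl_nil, pvStep, List.countP_cons, List.filter_cons]
    by_cases hd : PySem.Chars.isdigit a
    · simp only [hd, if_true, List.reverse_cons, pvTake6_snoc]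
    · simp [hd]

theorem pvCore_eq (xs : List Char) :
    (xs.reverse.take 6).reverse = xs.drop (xs.length - 6) := by
  rw [List.take_reverse]
  simp

theorem pvSlice_nat (xs : List Char) (a b : Nat) :
    PySem.List.slice xs (some (a : Int)) (some (b : Int)) = (xs.drop a).take (b - a) :=
  PySem.List.slice_natCast xs a b

theorem pvSlice02 (xs : List Char) : PySem.List.slice xs (some 0) (some 2) = xs.take 2 := by
  have h := pvSlice_nat xs 0 2; norm_num at h; exact h
theorem pvSlice24 (xs : List Char) : PySem.List.slice xs (some 2) (some 4) = (xs.drop 2).take 2 := by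
  have h := pvSlice_nat xs 2 4; norm_num at h; exact h
theorem pvSlice46 (xs : List Char) : PySem.List.slice xs (some 4) (some 6) = (xs.drop 4).take 2 := by
  have h := pvSlice_nat xs 4 6; norm_num at h; exact h
theorem pvSlice68 (xs : List Char) : PySem.List.slice xs (some 6) (some 8) = (xs.drop 6).take 2 := by
  have h := pvSlice_nat xs 6 8; norm_num at h; exact h

-- ===== VERDICT (by name: the statement is the Claim_ definition above) =====
set_option maxHeartbeats 1000000 in
theorem cf_ymd_yy_mm_dd_spec : Claim_equal_cf_ymd_yy_mm_dd := by
  intro val _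
  unfold Spec_cf_ymd_yy_mm_dd cf_ymd_yy_mm_dd cf_ymd_yy_mm_dd_alt
  have hB : PySem.Chars.strip (PySem.Chars.replace (PySem.Chars.replace val.toList ['\r'] [' ']) ['\n'] [' ']) = asciiTrim val := rfl
  rw [hB]
  set s := asciiTrim val with hs
  by_cases hnil : s = []
  · rw [if_pos hnil, if_pos hnil]
  · rw [if_neg hnil, if_neg hnil]
    rw [pvLoop_spec]
    set ds := s.filter PySem.Chars.isdigit with hds
    rw [List.countP_eq_length_filter, ← hds]
    set n := ds.length with hn
    have hcore : ((ds.reverse.take 6).reverse) = ds.drop (n - 6) := pvCore_eq ds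
    by_cases h8 : 8 ≤ n
    · rw [if_pos h8, if_pos (Or.inl h8)]
      have hd8 : (if 8 < n then PySem.List.slice ds (some (-8)) none else ds) = ds.drop (n - 8) := by
        by_cases hgt : 8 < n
        · rw [if_pos hgt, PySem.List.slice_from_neg_ofNat ds 8 (by omega)]
        · rw [if_neg hgt]
          have : n - 8 = 0 := by omega
          rw [this, List.drop_zero]
      rw [hd8, hcore]
      refine congrArg String.ofList ?_
      rw [pvSlice24, pvSlice46, pvSlice68, pvSlice02, pvSlice24, pvSlice46]
      have a1 : n - 8 + 2 = n - 6 := by omega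
      have a2 : n - 8 + 4 = n - 6 + 2 := by omega
      have a3 : n - 8 + 6 = n - 6 + 4 := by omega
      have e1 : (ds.drop (n - 8)).drop 2 = ds.drop (n - 6) := by
        rw [List.drop_drop, a1]
      have e2 : (ds.drop (n - 8)).drop 4 = (ds.drop (n - 6)).drop 2 := by
        rw [List.drop_drop, List.drop_drop, a2]
      have e3 : (ds.drop (n - 8)).drop 6 = (ds.drop (n - 6)).drop 4 := by
        rw [List.drop_drop, List.drop_drop, a3]
      rw [e1, e2, e3]
    · rw [if_neg h8]
      by_cases h6 : n = 6
      · rw [if_pos h6, if_pos (Or.inr h6), hcore, h6]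
        simp only [Nat.sub_self, List.drop_zero]
      · rw [if_neg h6, if_neg (by omega : ¬(8 ≤ n ∨ n = 6))]
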